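-- pv_equiv track=rewrite | github.com/dickinson-comp130-sp2026/web | resources/class28/more_string_methods_completed.py | check_comp_courses
-- ===== SOURCE A (Python) =====
-- def check_comp_courses(s):
--     """Return True if every occurrence of the substring 'COMP' in s is followed
--     by 3 digits, as in COMP130 or COMP332. Otherwise, return False."""
--
--     # The target string to search for
--     target = 'COMP'
--     # The index at which our next search for the target will begin
--     start_index = 0
--     # The number of digits which are expected to follow an occurrence of the target string
--     num_digits_expected = 3
--     while True:
--         # Find the next occurrence of the target string.
--         target_index = s.find(target, start_index)
--         # If there are no more occurrences of the target, we can return True because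
--         # every occurrence found was followed by the expected number of digits.
--         if target_index == -1:
--             return True
--         # Calculate the index for the start and end of the digits (inclusive and
--         # exclusive respectively).
--         digits_start = target_index + len(target)
--         digits_end = digits_start + num_digits_expected
--         # If the string s is too short to contain the required number of digits,
--         # we can immediately return False.
--         if len(s) < digits_end:
--             return False
--         # Check that the range from digits_start to digit_end consists entirely of digits.
--         expected_digits = s[digits_start:digits_end]
--         if not expected_digits.isdigit():
--             return False
--         # Update the start index so that the next search will begin after the
--         # previously-found occurrence of the target and its following digits.
--         start_index = target_index + len(target) + num_digits_expected
-- ===== SOURCE B (Python) =====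
-- def check_comp_courses(s):
--     """Return True if every occurrence of the substring 'COMP' in s is followed
--     by 3 digits, as in COMP130 or COMP332. Otherwise, return False."""
--     # Streaming finite-state automaton (KMP-style; 'COMP' has no border, so the
--     # failure transition is just: restart at 1 on 'C', else 0).  One pass over
--     # the characters with constant state, no substring search and no slicing.
--     match = 0  # how many characters of 'COMP' are currently matched
--     need = 0   # how many digits are still owed after a completed 'COMP'
--     for c in s:
--         if need > 0:
--             if not c.isdigit():
--                 return False
--             need -= 1
--         elif c == 'COMP'[match]:
--             match += 1
--             if match == 4:
--                 match = 0
--                 need = 3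
--         else:
--             match = 1 if c == 'C' else 0
--     return need == 0
-- ===== Notes on version B (the rewrite author's own statement) =====
-- stated objective: alternative
-- what changed: Replaces A's repeated find/slice/isdigit substring search with a streaming finite-state automaton (KMP-style: 'COMP' is border-free, so the failure transition is restart-on-'C') that makes one character-by-character pass carrying only a match-progress counter and a digits-owed counter, with no substring search, no slicing and no index arithmetic.
import Mathlib
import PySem

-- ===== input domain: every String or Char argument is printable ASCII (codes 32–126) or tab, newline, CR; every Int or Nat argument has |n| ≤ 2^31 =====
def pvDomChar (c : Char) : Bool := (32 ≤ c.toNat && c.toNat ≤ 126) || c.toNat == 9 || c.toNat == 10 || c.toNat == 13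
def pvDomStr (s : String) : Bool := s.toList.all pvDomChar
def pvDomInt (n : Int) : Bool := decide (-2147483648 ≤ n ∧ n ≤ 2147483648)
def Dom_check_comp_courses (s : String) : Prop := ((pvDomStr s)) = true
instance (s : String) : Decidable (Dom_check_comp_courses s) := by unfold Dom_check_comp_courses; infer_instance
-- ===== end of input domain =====

-- B replaces A's find/slice/isdigit substring-search loop by a one-pass finite-state automaton
-- ('COMP' is border-free, so the KMP failure transition is just restart-on-'C'); alternative, same cost.


-- ===== PORT A =====
-- A's while-True loop: find 'COMP' from start_index; -1 → True; too short → False;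
-- slice s[ti+4:ti+7] not all digits → False; else resume at ti+7.
-- The proof argument `h` only makes the recursion's measure work (start stays ≤ len(s)).
def pvAGo (l : List Char) (start : Nat) (h : start ≤ l.length) : Bool :=
  let ti : Int := PySem.Chars.findFrom l ['C', 'O', 'M', 'P'] (start : Int) none
  if hti : ti = -1 then true
  else if hlen : l.length < ti.toNat + 4 + 3 then false
  else if PySem.Chars.strIsdigit
      (PySem.Chars.slice l (some ((ti.toNat + 4 : Nat) : Int)) (some ((ti.toNat + 4 + 3 : Nat) : Int))) = false
    then false
  else pvAGo l (ti.toNat + 4 + 3) (by omega)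
termination_by l.length - start
decreasing_by
  have hs := (PySem.Chars.findFrom_natCast_spec l ['C', 'O', 'M', 'P'] start h hti).1
  omega

def check_comp_courses (s : String) : Bool := pvAGo s.toList 0 (Nat.zero_le _)

-- ===== PORT B =====
-- Source B's automaton loop: state = (mtch = chars of 'COMP' matched, need = digits still owed).
-- Python's `'COMP'[match]` is ported as `['C','O','M','P'][mtch]?`; exact wherever Python does
-- not raise (the loop keeps mtch ≤ 3, so the index is always in range).
def pvAltGo : List Char → Nat → Nat → Bool
  | [], _, need => need == 0
  | c :: t, mtch, need =>
    if 0 < need then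
      if PySem.Chars.isdigit c then pvAltGo t mtch (need - 1) else false
    else if (['C', 'O', 'M', 'P'] : List Char)[mtch]? == some c then
      if mtch + 1 == 4 then pvAltGo t 0 3 else pvAltGo t (mtch + 1) 0
    else if c == 'C' then pvAltGo t 1 0
    else pvAltGo t 0 0

def check_comp_courses_alt (s : String) : Bool := pvAltGo s.toList 0 0

-- ===== PRECONDITION & SPEC =====
def Spec_check_comp_courses (s : String) (out : Bool) : Prop := out = check_comp_courses_alt s
instance (s : String) (out : Bool) : Decidable (Spec_check_comp_courses s out) := by unfold Spec_check_comp_courses; infer_instance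

-- ===== CLAIM (what is proved, stated in full; the proofs are below) =====
def Claim_equal_check_comp_courses : Prop := ∀ (s : String), Dom_check_comp_courses s → Spec_check_comp_courses s (check_comp_courses s)

-- ===== LEMMAS AND PROOFS =====

-- "'COMP' starts at index i of l"
def pvCAt (l : List Char) (i : Nat) : Prop :=
  l[i]? = some 'C' ∧ l[i + 1]? = some 'O' ∧ l[i + 2]? = some 'M' ∧ l[i + 3]? = some 'P'

-- "index i of l exists and holds a digit"
def pvDigAt (l : List Char) (i : Nat) : Prop :=
  ∃ a, l[i]? = some a ∧ PySem.Chars.isdigit a = true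

-- the common specification: from index k on, every 'COMP' is followed by three digits
def pvSpecFrom (l : List Char) (k : Nat) : Prop :=
  ∀ i, k ≤ i → pvCAt l i → pvDigAt l (i + 4) ∧ pvDigAt l (i + 5) ∧ pvDigAt l (i + 6)

lemma pv_prefix4_iff (u : List Char) (a b c d : Char) :
    [a, b, c, d] <+: u ↔ u[0]? = some a ∧ u[1]? = some b ∧ u[2]? = some c ∧ u[3]? = some d := by
  match u with
  | [] => simp
  | [x0] => simp [List.cons_prefix_cons]
  | [x0, x1] => simp [List.cons_prefix_cons]
  | [x0, x1, x2] => simp [List.cons_prefix_cons]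
  | x0 :: x1 :: x2 :: x3 :: r => simp [List.cons_prefix_cons, eq_comm]

lemma pvCAt_iff_prefix (l : List Char) (i : Nat) :
    pvCAt l i ↔ ['C', 'O', 'M', 'P'] <+: l.drop i := by
  rw [pv_prefix4_iff]
  simp [pvCAt, List.getElem?_drop]

lemma pv_infix_of_prefix_suffix {p u v : List Char} (h1 : p <+: u) (h2 : u <:+ v) :
    p <:+: v := by
  obtain ⟨r, rfl⟩ := h1
  obtain ⟨w, rfl⟩ := h2
  exact ⟨w, r, by simp⟩

lemma pv_slice_eq (l : List Char) (m : Nat) (hm : m + 3 ≤ l.length) :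
    PySem.Chars.slice l (some (m : Int)) (some ((m + 3 : Nat) : Int)) =
      [l[m]'(by omega), l[m + 1]'(by omega), l[m + 2]'(by omega)] := by
  rw [PySem.Chars.slice_eq_listSlice,
    PySem.List.slice_toNat l (by positivity) (by positivity)]
  simp only [Int.toNat_natCast]
  rw [show m + 3 - m = 3 by omega,
    List.drop_eq_getElem_cons (show m < l.length by omega),
    List.drop_eq_getElem_cons (show m + 1 < l.length by omega),
    List.drop_eq_getElem_cons (show m + 2 < l.length by omega)]
  rfl

lemma pv_slice_digit_iff (l : List Char) (m : Nat) (hm : m + 3 ≤ l.length) :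
    PySem.Chars.strIsdigit
        (PySem.Chars.slice l (some (m : Int)) (some ((m + 3 : Nat) : Int))) = true ↔
      pvDigAt l m ∧ pvDigAt l (m + 1) ∧ pvDigAt l (m + 2) := by
  rw [pv_slice_eq l m hm]
  simp [PySem.Chars.strIsdigit, pvDigAt,
    List.getElem?_eq_getElem (show m < l.length by omega),
    List.getElem?_eq_getElem (show m + 1 < l.length by omega),
    List.getElem?_eq_getElem (show m + 2 < l.length by omega)]

lemma pvDigAt_congr (l : List Char) {i j : Nat} (h : i = j) : pvDigAt l i ↔ pvDigAt l j := by
  rw [h]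

lemma pvAGo_iff (l : List Char) (start : Nat) (h : start ≤ l.length) :
    pvAGo l start h = true ↔ pvSpecFrom l start := by
  induction start, h using pvAGo.induct l with
  | case1 start h ti hti =>
    have hti' : PySem.Chars.findFrom l ['C', 'O', 'M', 'P'] (start : Int) none = -1 := hti
    rw [pvAGo, dif_pos hti']
    refine iff_of_true rfl ?_
    intro i hi hc
    exfalso
    have hni : ¬ ['C', 'O', 'M', 'P'] <:+: l.drop start :=
      (PySem.Chars.findFrom_natCast_eq_neg_one_iff l _ start h).mp hti'
    have hsuf : l.drop i <:+ l.drop start := by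
      have hd : l.drop i = (l.drop start).drop (i - start) := by
        rw [List.drop_drop]; congr 1; omega
      rw [hd]; exact List.drop_suffix _ _
    exact hni (pv_infix_of_prefix_suffix ((pvCAt_iff_prefix l i).mp hc) hsuf)
  | case2 start h ti hti hlen =>
    have hti' : ¬ PySem.Chars.findFrom l ['C', 'O', 'M', 'P'] (start : Int) none = -1 := hti
    have hlen' : l.length <
        (PySem.Chars.findFrom l ['C', 'O', 'M', 'P'] (start : Int) none).toNat + 4 + 3 := hlen
    rw [pvAGo, dif_neg hti', dif_pos hlen']
    refine iff_of_false (by simp) fun hs => ?_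
    have spec := PySem.Chars.findFrom_natCast_spec l ['C', 'O', 'M', 'P'] start h hti'
    have hc : pvCAt l (PySem.Chars.findFrom l ['C', 'O', 'M', 'P'] (start : Int) none).toNat :=
      (pvCAt_iff_prefix l _).mpr spec.2.1
    obtain ⟨a, ha, -⟩ := (hs _ (by omega) hc).2.2
    rw [List.getElem?_eq_none (by omega)] at ha
    cases ha
  | case3 start h ti hti hlen hdig =>
    have hti' : ¬ PySem.Chars.findFrom l ['C', 'O', 'M', 'P'] (start : Int) none = -1 := hti
    have hlen' : ¬ l.length <
        (PySem.Chars.findFrom l ['C', 'O', 'M', 'P'] (start : Int) none).toNat + 4 + 3 := hlen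
    have hdig' : PySem.Chars.strIsdigit (PySem.Chars.slice l
        (some (((PySem.Chars.findFrom l ['C', 'O', 'M', 'P'] (start : Int) none).toNat + 4 : Nat) : Int))
        (some (((PySem.Chars.findFrom l ['C', 'O', 'M', 'P'] (start : Int) none).toNat + 4 + 3 : Nat) : Int)))
        = false := hdig
    rw [pvAGo, dif_neg hti', dif_neg hlen', if_pos hdig']
    refine iff_of_false (by simp) fun hs => ?_
    have spec := PySem.Chars.findFrom_natCast_spec l ['C', 'O', 'M', 'P'] start h hti'
    have hc : pvCAt l (PySem.Chars.findFrom l ['C', 'O', 'M', 'P'] (start : Int) none).toNat :=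
      (pvCAt_iff_prefix l _).mpr spec.2.1
    obtain ⟨d4, d5, d6⟩ := hs _ (by omega) hc
    rw [(pv_slice_digit_iff l _ (by omega)).mpr
      ⟨d4, (pvDigAt_congr l (by omega)).mp d5, (pvDigAt_congr l (by omega)).mp d6⟩] at hdig'
    cases hdig'
  | case4 start h ti hti hlen hdig ih =>
    have hti' : ¬ PySem.Chars.findFrom l ['C', 'O', 'M', 'P'] (start : Int) none = -1 := hti
    have hlen' : ¬ l.length <
        (PySem.Chars.findFrom l ['C', 'O', 'M', 'P'] (start : Int) none).toNat + 4 + 3 := hlen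
    have hdig' : ¬ PySem.Chars.strIsdigit (PySem.Chars.slice l
        (some (((PySem.Chars.findFrom l ['C', 'O', 'M', 'P'] (start : Int) none).toNat + 4 : Nat) : Int))
        (some (((PySem.Chars.findFrom l ['C', 'O', 'M', 'P'] (start : Int) none).toNat + 4 + 3 : Nat) : Int)))
        = false := hdig
    have ih' : pvAGo l
        ((PySem.Chars.findFrom l ['C', 'O', 'M', 'P'] (start : Int) none).toNat + 4 + 3) (by omega)
        = true ↔ pvSpecFrom l
        ((PySem.Chars.findFrom l ['C', 'O', 'M', 'P'] (start : Int) none).toNat + 4 + 3) := ih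
    rw [pvAGo, dif_neg hti', dif_neg hlen', if_neg hdig', ih']
    have spec := PySem.Chars.findFrom_natCast_spec l ['C', 'O', 'M', 'P'] start h hti'
    set m := (PySem.Chars.findFrom l ['C', 'O', 'M', 'P'] (start : Int) none).toNat with hm
    have hsd : PySem.Chars.strIsdigit (PySem.Chars.slice l
        (some ((m + 4 : Nat) : Int)) (some ((m + 4 + 3 : Nat) : Int))) = true := by
      revert hdig'
      cases PySem.Chars.strIsdigit (PySem.Chars.slice l
        (some ((m + 4 : Nat) : Int)) (some ((m + 4 + 3 : Nat) : Int))) <;> simp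
    obtain ⟨d4, d5, d6⟩ := (pv_slice_digit_iff l (m + 4) (by omega)).mp hsd
    constructor
    · intro h7 i hi hci
      rcases Nat.lt_or_ge i m with hlt | hge
      · exact absurd ((pvCAt_iff_prefix l i).mp hci) (spec.2.2 i hi hlt)
      rcases Nat.lt_or_ge i (m + 4 + 3) with hlt7 | hge7
      · rcases Nat.eq_or_lt_of_le hge with rfl | hgt
        · exact ⟨d4, (pvDigAt_congr l (by omega)).mp d5, (pvDigAt_congr l (by omega)).mp d6⟩
        exfalso
        obtain ⟨a4, ha4, hda4⟩ := d4
        obtain ⟨a5, ha5, hda5⟩ := d5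
        obtain ⟨a6, ha6, hda6⟩ := d6
        obtain ⟨hcC, hcO, hcM, hcP⟩ := hci
        have hi6 : i = m + 1 ∨ i = m + 2 ∨ i = m + 3 ∨ i = m + 4 ∨ i = m + 5 ∨ i = m + 6 := by
          omega
        rcases hi6 with rfl | rfl | rfl | rfl | rfl | rfl
        · rw [show m + 1 + 3 = m + 4 by omega, ha4] at hcP
          cases hcP; exact absurd hda4 (by decide)
        · rw [show m + 2 + 2 = m + 4 by omega, ha4] at hcM
          cases hcM; exact absurd hda4 (by decide)
        · rw [show m + 3 + 1 = m + 4 by omega, ha4] at hcO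
          cases hcO; exact absurd hda4 (by decide)
        · rw [ha4] at hcC
          cases hcC; exact absurd hda4 (by decide)
        · rw [show m + 5 = m + 4 + 1 by omega, ha5] at hcC
          cases hcC; exact absurd hda5 (by decide)
        · rw [show m + 6 = m + 4 + 2 by omega, ha6] at hcC
          cases hcC; exact absurd hda6 (by decide)
      · exact h7 i hge7 hci
    · intro hs i hi hci
      exact hs i (by omega) hci

-- ---- B-side: automaton correctness ----

-- the k-character prefix of 'COMP' already matched by the automaton
def pvP (k : Nat) : List Char := (['C', 'O', 'M', 'P'] : List Char).take k

-- "n digits are owed, then the rest must satisfy the spec"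
def pvDig : Nat → List Char → Prop
  | 0, rest => pvSpecFrom rest 0
  | _ + 1, [] => False
  | n + 1, c :: t => PySem.Chars.isdigit c = true ∧ pvDig n t

lemma pvCAt_append (u t : List Char) (i : Nat) : pvCAt (u ++ t) (u.length + i) ↔ pvCAt t i := by
  unfold pvCAt
  rw [List.getElem?_append_right (by omega), List.getElem?_append_right (by omega),
    List.getElem?_append_right (by omega), List.getElem?_append_right (by omega)]
  simp only [show u.length + i - u.length = i by omega,
    show u.length + i + 1 - u.length = i + 1 by omega,
    show u.length + i + 2 - u.length = i + 2 by omega,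
    show u.length + i + 3 - u.length = i + 3 by omega]

lemma pvDigAt_append (u t : List Char) (i : Nat) : pvDigAt (u ++ t) (u.length + i) ↔ pvDigAt t i := by
  unfold pvDigAt
  rw [List.getElem?_append_right (by omega)]
  simp only [show u.length + i - u.length = i by omega]

lemma pvCAt_cons (c : Char) (t : List Char) (i : Nat) : pvCAt (c :: t) (i + 1) ↔ pvCAt t i := by
  rw [show (c :: t) = [c] ++ t from rfl,
    show i + 1 = ([c] : List Char).length + i by simp only [List.length_cons, List.length_nil]; omega]
  exact pvCAt_append [c] t i

lemma pvDigAt_cons (c : Char) (t : List Char) (i : Nat) : pvDigAt (c :: t) (i + 1) ↔ pvDigAt t i := by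
  simp [pvDigAt, List.getElem?_cons_succ]

lemma pvSpecFrom_cons (c : Char) (t : List Char) :
    pvSpecFrom (c :: t) 0 ↔
      (pvCAt (c :: t) 0 → pvDigAt (c :: t) 4 ∧ pvDigAt (c :: t) 5 ∧ pvDigAt (c :: t) 6) ∧
      pvSpecFrom t 0 := by
  constructor
  · intro h
    refine ⟨h 0 (Nat.le_refl _), fun i _ hc => ?_⟩
    obtain ⟨e4, e5, e6⟩ := h (i + 1) (Nat.zero_le _) ((pvCAt_cons c t i).mpr hc)
    refine ⟨?_, ?_, ?_⟩
    · rw [← pvDigAt_cons c, ← pvDigAt_congr (c :: t) (show i + 1 + 4 = (i + 4) + 1 by omega)]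
      exact e4
    · rw [← pvDigAt_cons c, ← pvDigAt_congr (c :: t) (show i + 1 + 5 = (i + 5) + 1 by omega)]
      exact e5
    · rw [← pvDigAt_cons c, ← pvDigAt_congr (c :: t) (show i + 1 + 6 = (i + 6) + 1 by omega)]
      exact e6
  · rintro ⟨h0, hrest⟩ i _ hc
    cases i with
    | zero => exact h0 hc
    | succ i =>
      obtain ⟨e4, e5, e6⟩ := hrest i (Nat.zero_le _) ((pvCAt_cons c t i).mp hc)
      refine ⟨?_, ?_, ?_⟩
      · rw [show i + 1 + 4 = (i + 4) + 1 by omega, pvDigAt_cons]; exact e4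
      · rw [show i + 1 + 5 = (i + 5) + 1 by omega, pvDigAt_cons]; exact e5
      · rw [show i + 1 + 6 = (i + 6) + 1 by omega, pvDigAt_cons]; exact e6

lemma pvSpecFrom_cons_of_not (c : Char) (t : List Char) (h : ¬ pvCAt (c :: t) 0) :
    pvSpecFrom (c :: t) 0 ↔ pvSpecFrom t 0 := by
  rw [pvSpecFrom_cons]
  simp [h]

lemma pvCAt_congr (l : List Char) {i j : Nat} (h : i = j) : pvCAt l i ↔ pvCAt l j := by
  rw [h]

lemma pvCAt_length (l : List Char) (i : Nat) (h : pvCAt l i) : i + 4 ≤ l.length := by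
  obtain ⟨-, -, -, h3⟩ := h
  obtain ⟨hlt, -⟩ := List.getElem?_eq_some_iff.mp h3
  omega

lemma pvSpecFrom_short (l : List Char) (h : l.length ≤ 3) : pvSpecFrom l 0 := by
  intro i _ hc
  have := pvCAt_length l i hc
  omega

-- the bridge at a completed match: 3 digits owed ↔ the spec for 'COMP' ++ t
lemma pvDig3_iff (t : List Char) : pvDig 3 t ↔ pvSpecFrom ('C' :: 'O' :: 'M' :: 'P' :: t) 0 := by
  match t with
  | [] =>
    refine iff_of_false (by simp [pvDig]) fun h => ?_
    obtain ⟨⟨a, ha, -⟩, -, -⟩ := h 0 (Nat.le_refl _) (by simp [pvCAt])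
    simp at ha
  | [x] =>
    refine iff_of_false (by simp [pvDig]) fun h => ?_
    obtain ⟨-, ⟨a, ha, -⟩, -⟩ := h 0 (Nat.le_refl _) (by simp [pvCAt])
    simp at ha
  | [x, y] =>
    refine iff_of_false (by simp [pvDig]) fun h => ?_
    obtain ⟨-, -, ⟨a, ha, -⟩⟩ := h 0 (Nat.le_refl _) (by simp [pvCAt])
    simp at ha
  | a :: b :: d :: t' =>
    have hl : ('C' :: 'O' :: 'M' :: 'P' :: a :: b :: d :: t' : List Char) =
        ['C', 'O', 'M', 'P', a, b, d] ++ t' := rfl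
    constructor
    · rintro ⟨ha, hb, hd, hs'⟩ i _ hc
      rcases Nat.lt_or_ge i 7 with h7 | h7
      · obtain ⟨hcC, hcO, hcM, hcP⟩ := hc
        interval_cases i
        · exact ⟨⟨a, rfl, ha⟩, ⟨b, rfl, hb⟩, ⟨d, rfl, hd⟩⟩
        · simp at hcC
        · simp at hcC
        · simp at hcC
        · simp at hcC
          subst hcC
          exact absurd ha (by decide)
        · simp at hcC
          subst hcC
          exact absurd hb (by decide)
        · simp at hcC
          subst hcC
          exact absurd hd (by decide)
      · obtain ⟨j, rfl⟩ : ∃ j, i = 7 + j := ⟨i - 7, by omega⟩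
        rw [hl, pvCAt_congr _ (show 7 + j = (['C','O','M','P',a,b,d] : List Char).length + j
            by simp only [List.length_cons, List.length_nil]; try omega),
          pvCAt_append] at hc
        obtain ⟨e4, e5, e6⟩ := hs' j (Nat.zero_le _) hc
        rw [hl]
        refine ⟨?_, ?_, ?_⟩
        · rw [pvDigAt_congr _ (show 7 + j + 4 = (['C','O','M','P',a,b,d] : List Char).length + (j + 4) by simp only [List.length_cons, List.length_nil]; try omega),
            pvDigAt_append]
          exact e4
        · rw [pvDigAt_congr _ (show 7 + j + 5 = (['C','O','M','P',a,b,d] : List Char).length + (j + 5) by simp only [List.length_cons, List.length_nil]; try omega),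
            pvDigAt_append]
          exact e5
        · rw [pvDigAt_congr _ (show 7 + j + 6 = (['C','O','M','P',a,b,d] : List Char).length + (j + 6) by simp only [List.length_cons, List.length_nil]; try omega),
            pvDigAt_append]
          exact e6
    · intro h
      obtain ⟨⟨x4, hx4, hd4⟩, ⟨x5, hx5, hd5⟩, ⟨x6, hx6, hd6⟩⟩ :=
        h 0 (Nat.le_refl _) (by simp [pvCAt])
      simp at hx4 hx5 hx6
      subst hx4; subst hx5; subst hx6
      refine ⟨hd4, hd5, hd6, fun j _ hc => ?_⟩
      have hc' := (pvCAt_append (['C', 'O', 'M', 'P', a, b, d]) t' j).mpr hc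
      rw [← hl] at hc'
      obtain ⟨e4, e5, e6⟩ := h (7 + j) (Nat.zero_le _)
        (by rw [pvCAt_iff_prefix] at hc' ⊢; simpa using hc')
      rw [hl] at e4 e5 e6
      refine ⟨?_, ?_, ?_⟩
      · rw [← pvDigAt_append (['C', 'O', 'M', 'P', a, b, d]),
          ← pvDigAt_congr _ (show 7 + j + 4 = (['C','O','M','P',a,b,d] : List Char).length + (j + 4) by simp only [List.length_cons, List.length_nil]; try omega)]
        exact e4
      · rw [← pvDigAt_append (['C', 'O', 'M', 'P', a, b, d]),
          ← pvDigAt_congr _ (show 7 + j + 5 = (['C','O','M','P',a,b,d] : List Char).length + (j + 5) by simp only [List.length_cons, List.length_nil]; try omega)]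
        exact e5
      · rw [← pvDigAt_append (['C', 'O', 'M', 'P', a, b, d]),
          ← pvDigAt_congr _ (show 7 + j + 6 = (['C','O','M','P',a,b,d] : List Char).length + (j + 6) by simp only [List.length_cons, List.length_nil]; try omega)]
        exact e6

-- the automaton invariant, both phases at once
lemma pvAltMain (rest : List Char) :
    (∀ k, k ≤ 3 → (pvAltGo rest k 0 = true ↔ pvSpecFrom (pvP k ++ rest) 0)) ∧
    (∀ n, n ≤ 3 → (pvAltGo rest 0 n = true ↔ pvDig n rest)) := by
  induction rest with
  | nil =>
    constructor
    · intro k hk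
      refine iff_of_true (by simp [pvAltGo]) (pvSpecFrom_short _ ?_)
      simp [pvP]
      omega
    · intro n _
      cases n with
      | zero => exact iff_of_true (by simp [pvAltGo]) (pvSpecFrom_short _ (by simp))
      | succ n => exact iff_of_false (by simp [pvAltGo]) (by simp [pvDig])
  | cons c t ih =>
    have hp1 : ∀ k, k ≤ 3 → (pvAltGo (c :: t) k 0 = true ↔ pvSpecFrom (pvP k ++ c :: t) 0) := by
      intro k hk
      interval_cases k
      · by_cases hc : c = 'C'
        · subst hc
          rw [show pvAltGo ('C' :: t) 0 0 = pvAltGo t 1 0 by simp [pvAltGo]]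
          simpa [pvP] using ih.1 1 (by omega)
        · rw [show pvAltGo (c :: t) 0 0 = pvAltGo t 0 0 by simp [pvAltGo, hc, Ne.symm hc]]
          rw [ih.1 0 (by omega)]
          rw [show pvP 0 ++ t = t from rfl, show pvP 0 ++ c :: t = c :: t from rfl]
          exact (pvSpecFrom_cons_of_not c t (by simp [pvCAt, hc])).symm
      · by_cases hc : c = 'O'
        · subst hc
          rw [show pvAltGo ('O' :: t) 1 0 = pvAltGo t 2 0 by simp [pvAltGo]]
          simpa [pvP] using ih.1 2 (by omega)
        · by_cases hC : c = 'C'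
          · subst hC
            rw [show pvAltGo ('C' :: t) 1 0 = pvAltGo t 1 0 by simp [pvAltGo]]
            rw [ih.1 1 (by omega)]
            rw [show pvP 1 ++ 'C' :: t = 'C' :: 'C' :: t from rfl,
              show pvP 1 ++ t = 'C' :: t from rfl]
            exact (pvSpecFrom_cons_of_not 'C' ('C' :: t) (by simp [pvCAt])).symm
          · rw [show pvAltGo (c :: t) 1 0 = pvAltGo t 0 0
              by simp [pvAltGo, hC, Ne.symm hc]]
            rw [ih.1 0 (by omega)]
            rw [show pvP 0 ++ t = t from rfl, show pvP 1 ++ c :: t = 'C' :: c :: t from rfl]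
            rw [pvSpecFrom_cons_of_not 'C' (c :: t) (by simp [pvCAt, hc])]
            exact (pvSpecFrom_cons_of_not c t (by simp [pvCAt, hC])).symm
      · by_cases hc : c = 'M'
        · subst hc
          rw [show pvAltGo ('M' :: t) 2 0 = pvAltGo t 3 0 by simp [pvAltGo]]
          simpa [pvP] using ih.1 3 (by omega)
        · by_cases hC : c = 'C'
          · subst hC
            rw [show pvAltGo ('C' :: t) 2 0 = pvAltGo t 1 0 by simp [pvAltGo]]
            rw [ih.1 1 (by omega)]
            rw [show pvP 2 ++ 'C' :: t = 'C' :: 'O' :: 'C' :: t from rfl,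
              show pvP 1 ++ t = 'C' :: t from rfl]
            rw [pvSpecFrom_cons_of_not 'C' ('O' :: 'C' :: t) (by simp [pvCAt])]
            rw [pvSpecFrom_cons_of_not 'O' ('C' :: t) (by simp [pvCAt])]
          · rw [show pvAltGo (c :: t) 2 0 = pvAltGo t 0 0
              by simp [pvAltGo, hC, Ne.symm hc]]
            rw [ih.1 0 (by omega)]
            rw [show pvP 0 ++ t = t from rfl,
              show pvP 2 ++ c :: t = 'C' :: 'O' :: c :: t from rfl]
            rw [pvSpecFrom_cons_of_not 'C' ('O' :: c :: t) (by simp [pvCAt, hc])]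
            rw [pvSpecFrom_cons_of_not 'O' (c :: t) (by simp [pvCAt])]
            exact (pvSpecFrom_cons_of_not c t (by simp [pvCAt, hC])).symm
      · by_cases hc : c = 'P'
        · subst hc
          rw [show pvAltGo ('P' :: t) 3 0 = pvAltGo t 0 3 by simp [pvAltGo]]
          rw [ih.2 3 (by omega), pvDig3_iff]
          rw [show pvP 3 ++ 'P' :: t = 'C' :: 'O' :: 'M' :: 'P' :: t from rfl]
        · by_cases hC : c = 'C'
          · subst hC
            rw [show pvAltGo ('C' :: t) 3 0 = pvAltGo t 1 0 by simp [pvAltGo]]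
            rw [ih.1 1 (by omega)]
            rw [show pvP 3 ++ 'C' :: t = 'C' :: 'O' :: 'M' :: 'C' :: t from rfl,
              show pvP 1 ++ t = 'C' :: t from rfl]
            rw [pvSpecFrom_cons_of_not 'C' ('O' :: 'M' :: 'C' :: t) (by simp [pvCAt])]
            rw [pvSpecFrom_cons_of_not 'O' ('M' :: 'C' :: t) (by simp [pvCAt])]
            rw [pvSpecFrom_cons_of_not 'M' ('C' :: t) (by simp [pvCAt])]
          · rw [show pvAltGo (c :: t) 3 0 = pvAltGo t 0 0
              by simp [pvAltGo, hC, Ne.symm hc]]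
            rw [ih.1 0 (by omega)]
            rw [show pvP 0 ++ t = t from rfl,
              show pvP 3 ++ c :: t = 'C' :: 'O' :: 'M' :: c :: t from rfl]
            rw [pvSpecFrom_cons_of_not 'C' ('O' :: 'M' :: c :: t) (by simp [pvCAt, hc])]
            rw [pvSpecFrom_cons_of_not 'O' ('M' :: c :: t) (by simp [pvCAt])]
            rw [pvSpecFrom_cons_of_not 'M' (c :: t) (by simp [pvCAt])]
            exact (pvSpecFrom_cons_of_not c t (by simp [pvCAt, hC])).symm
    refine ⟨hp1, fun n hn => ?_⟩
    cases n with
    | zero =>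
      rw [hp1 0 (by omega)]
      simp only [pvP, List.take_zero, List.nil_append]
      rfl
    | succ n =>
      cases hd : PySem.Chars.isdigit c with
      | true =>
        rw [show pvAltGo (c :: t) 0 (n + 1) = pvAltGo t 0 n by simp [pvAltGo, hd]]
        rw [ih.2 n (by omega)]
        simp [pvDig, hd]
      | false =>
        rw [show pvAltGo (c :: t) 0 (n + 1) = false by simp [pvAltGo, hd]]
        simp [pvDig, hd]

lemma pvAltGo_iff (l : List Char) : pvAltGo l 0 0 = true ↔ pvSpecFrom l 0 := by
  have h := (pvAltMain l).1 0 (by omega)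
  simpa [pvP] using h

-- ===== VERDICT (by name: the statement is the Claim_ definition above) =====
theorem check_comp_courses_spec : Claim_equal_check_comp_courses := by
  intro s _
  unfold Spec_check_comp_courses check_comp_courses check_comp_courses_alt
  have h1 := pvAGo_iff s.toList 0 (Nat.zero_le _)
  have h2 := pvAltGo_iff s.toList
  exact Bool.coe_iff_coe.mp (h1.trans h2.symm)
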